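-- pv_equiv track=rewrite | github.com/Juan-Antonio-FA/Administraci-n-de-Servicios-en-Red | Proyecto_redes_Monitoreo_GUI.py | find_connected_router
-- ===== SOURCE A (Python) =====
-- router_to_devices = {
--     "R1": ["Switch1"],
--     "R2": ["PC12", "PC11", "PC10"],
--     "R3": ["PC9", "PC8", "PC7"],
--     "R4": ["PC1", "PC2", "PC3"],
--     "R5": ["PC4", "PC5", "PC6"],
--     "Switch1": ["Ubuntu20.04VM-1"],  # Agregado
-- }
--
-- switch_to_router = {
--     "Switch1": "R1",
-- }
--
-- def find_connected_router(pc_nombre, accessible_routers):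
--     """
--     Encuentra el router al que está conectada una PC o VM, directamente o vía un switch,
--     y verifica si el router es accesible.
--     """
--     # Verificar conexiones directas a routers
--     for router, pcs in router_to_devices.items():
--         if router.startswith("R") and (pc_nombre in pcs) and (router in accessible_routers):
--             return router
--
--     # Verificar conexiones a través de switches
--     for switch, pcs in router_to_devices.items():
--         if switch.startswith("Switch") and pc_nombre in pcs:
--             # Retorna el router asociado al switch si es accesible
--             router_associated = switch_to_router.get(switch)
--             if router_associated and router_associated in accessible_routers:
--                 return router_associated
--     return None
-- ===== SOURCE B (Python) =====
-- router_to_devices = {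
--     "R1": ["Switch1"],
--     "R2": ["PC12", "PC11", "PC10"],
--     "R3": ["PC9", "PC8", "PC7"],
--     "R4": ["PC1", "PC2", "PC3"],
--     "R5": ["PC4", "PC5", "PC6"],
--     "Switch1": ["Ubuntu20.04VM-1"],  # Agregado
-- }
--
-- switch_to_router = {
--     "Switch1": "R1",
-- }
--
-- def _build_index():
--     # Reverse index: device name -> ordered list of candidate routers
--     # (direct routers first, then switch-derived ones, preserving priority).
--     idx = {}
--     for router, pcs in router_to_devices.items():
--         if router.startswith("R"):
--             for pc in pcs:
--                 idx.setdefault(pc, []).append(router)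
--     for switch, pcs in router_to_devices.items():
--         if switch.startswith("Switch"):
--             r = switch_to_router.get(switch)
--             if r:
--                 for pc in pcs:
--                     idx.setdefault(pc, []).append(r)
--     return idx
--
-- _INDEX = _build_index()
--
-- def find_connected_router(pc_nombre, accessible_routers):
--     """
--     Encuentra el router al que está conectada una PC o VM, directamente o vía un switch,
--     y verifica si el router es accesible.
--     """
--     for cand in _INDEX.get(pc_nombre, []):
--         if cand in accessible_routers:
--             return cand
--     return None
-- ===== Notes on version B (the rewrite author's own statement) =====
-- stated objective: alternative
-- what changed: Replaces the two sequential scans of router_to_devices (direct-router pass, then switch pass, each testing pc membership and accessibility inline) by a precomputed reverse index mapping each device name to its ordered candidate-router list, so the lookup is a single dict get followed by a first-accessible search.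
import Mathlib
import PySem

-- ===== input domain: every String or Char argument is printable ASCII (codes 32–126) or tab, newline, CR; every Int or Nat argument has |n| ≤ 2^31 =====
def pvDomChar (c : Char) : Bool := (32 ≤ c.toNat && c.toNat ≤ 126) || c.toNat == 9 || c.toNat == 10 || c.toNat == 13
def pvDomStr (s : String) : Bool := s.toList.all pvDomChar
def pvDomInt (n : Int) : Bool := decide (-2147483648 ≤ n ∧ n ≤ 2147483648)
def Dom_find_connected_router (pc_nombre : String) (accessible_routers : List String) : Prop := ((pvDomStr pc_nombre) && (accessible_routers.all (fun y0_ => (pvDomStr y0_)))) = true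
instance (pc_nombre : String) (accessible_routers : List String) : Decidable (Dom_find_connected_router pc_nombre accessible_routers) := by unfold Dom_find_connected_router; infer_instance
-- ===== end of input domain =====

-- B replaces A's two sequential scans of the device table by a precomputed reverse index
-- (device -> ordered candidate routers) plus a single lookup; alternative decomposition, same results.


-- ===== PORT A =====
-- module constant router_to_devices (dict, insertion order)
def pvRouterToDevices : PySem.Dict String (List String) :=
  PySem.Dict.ofList [("R1", ["Switch1"]), ("R2", ["PC12", "PC11", "PC10"]),
    ("R3", ["PC9", "PC8", "PC7"]), ("R4", ["PC1", "PC2", "PC3"]),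
    ("R5", ["PC4", "PC5", "PC6"]), ("Switch1", ["Ubuntu20.04VM-1"])]

-- module constant switch_to_router
def pvSwitchToRouter : PySem.Dict String String := PySem.Dict.ofList [("Switch1", "R1")]

-- first loop of A: direct connections to routers (early return)
def pvLoop1 (pc_nombre : String) (accessible_routers : List String) :
    List (String × List String) → Option String
  | [] => none
  | (router, pcs) :: rest =>
    if PySem.Str.startswith router "R" && pcs.contains pc_nombre
        && accessible_routers.contains router then some router
    else pvLoop1 pc_nombre accessible_routers rest

-- second loop of A: connections via switches (early return inside the if)
def pvLoop2 (pc_nombre : String) (accessible_routers : List String) :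
    List (String × List String) → Option String
  | [] => none
  | (switch, pcs) :: rest =>
    if PySem.Str.startswith switch "Switch" && pcs.contains pc_nombre then
      match PySem.Dict.get? pvSwitchToRouter switch with
      | some router_associated =>
        -- Python truthiness of a str: non-empty
        if router_associated ≠ "" && accessible_routers.contains router_associated then
          some router_associated
        else pvLoop2 pc_nombre accessible_routers rest
      | none => pvLoop2 pc_nombre accessible_routers rest
    else pvLoop2 pc_nombre accessible_routers rest

def find_connected_router (pc_nombre : String) (accessible_routers : List String) : Option String :=
  match pvLoop1 pc_nombre accessible_routers pvRouterToDevices.items with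
  | some r => some r
  | none => pvLoop2 pc_nombre accessible_routers pvRouterToDevices.items

-- ===== PORT B =====
-- idx.setdefault(pc, []).append(r)
def pvAppendCand (idx : PySem.Dict String (List String)) (pc r : String) :
    PySem.Dict String (List String) :=
  PySem.Dict.insert idx pc (PySem.Dict.getD idx pc [] ++ [r])

-- _build_index(): reverse index device -> ordered candidate routers
def pvIndex : PySem.Dict String (List String) :=
  let idx :=
    pvRouterToDevices.items.foldl (fun idx p =>
      if PySem.Str.startswith p.1 "R" then
        p.2.foldl (fun idx pc => pvAppendCand idx pc p.1) idx
      else idx) PySem.Dict.empty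
  pvRouterToDevices.items.foldl (fun idx p =>
    if PySem.Str.startswith p.1 "Switch" then
      match PySem.Dict.get? pvSwitchToRouter p.1 with
      | some r => if r ≠ "" then p.2.foldl (fun idx pc => pvAppendCand idx pc r) idx else idx
      | none => idx
    else idx) idx

def find_connected_router_alt (pc_nombre : String) (accessible_routers : List String) :
    Option String :=
  (PySem.Dict.getD pvIndex pc_nombre []).find? (fun cand => accessible_routers.contains cand)

-- ===== PRECONDITION & SPEC =====
def Spec_find_connected_router (pc_nombre : String) (accessible_routers : List String) (out : Option String) : Prop := out = find_connected_router_alt pc_nombre accessible_routers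
instance (pc_nombre : String) (accessible_routers : List String) (out : Option String) : Decidable (Spec_find_connected_router pc_nombre accessible_routers out) := by unfold Spec_find_connected_router; infer_instance

-- ===== CLAIM (what is proved, stated in full; the proofs are below) =====
def Claim_equal_find_connected_router : Prop := ∀ (pc_nombre : String) (accessible_routers : List String), Dom_find_connected_router pc_nombre accessible_routers → Spec_find_connected_router pc_nombre accessible_routers (find_connected_router pc_nombre accessible_routers)

-- ===== LEMMAS AND PROOFS =====
theorem pvIndex_eval : pvIndex = PySem.Dict.ofList
    [("Switch1", ["R1"]), ("PC12", ["R2"]), ("PC11", ["R2"]), ("PC10", ["R2"]),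
     ("PC9", ["R3"]), ("PC8", ["R3"]), ("PC7", ["R3"]),
     ("PC1", ["R4"]), ("PC2", ["R4"]), ("PC3", ["R4"]),
     ("PC4", ["R5"]), ("PC5", ["R5"]), ("PC6", ["R5"]),
     ("Ubuntu20.04VM-1", ["R1"])] := by decide

-- ===== VERDICT (by name: the statement is the Claim_ definition above) =====
theorem find_connected_router_spec : Claim_equal_find_connected_router := by
  intro pc acc _
  unfold Spec_find_connected_router find_connected_router find_connected_router_alt
  rw [pvIndex_eval]
  by_cases h1 : pc = "Switch1"
  · subst h1; by_cases hm : "R1" ∈ acc <;>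
      simp [pvLoop1, pvLoop2, pvRouterToDevices, pvSwitchToRouter, PySem.Dict.getD,
      PySem.Dict.get?, PySem.Dict.ofList, PySem.Dict.update, PySem.Dict.empty,
      PySem.Dict.insert, PySem.Str.startswith, PySem.Chars.startswith, hm]
  by_cases h2 : pc = "PC12"
  · subst h2; by_cases hm : "R2" ∈ acc <;>
      simp [pvLoop1, pvLoop2, pvRouterToDevices, pvSwitchToRouter, PySem.Dict.getD,
      PySem.Dict.get?, PySem.Dict.ofList, PySem.Dict.update, PySem.Dict.empty,
      PySem.Dict.insert, PySem.Str.startswith, PySem.Chars.startswith, hm]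
  by_cases h3 : pc = "PC11"
  · subst h3; by_cases hm : "R2" ∈ acc <;>
      simp [pvLoop1, pvLoop2, pvRouterToDevices, pvSwitchToRouter, PySem.Dict.getD,
      PySem.Dict.get?, PySem.Dict.ofList, PySem.Dict.update, PySem.Dict.empty,
      PySem.Dict.insert, PySem.Str.startswith, PySem.Chars.startswith, hm]
  by_cases h4 : pc = "PC10"
  · subst h4; by_cases hm : "R2" ∈ acc <;>
      simp [pvLoop1, pvLoop2, pvRouterToDevices, pvSwitchToRouter, PySem.Dict.getD,
      PySem.Dict.get?, PySem.Dict.ofList, PySem.Dict.update, PySem.Dict.empty,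
      PySem.Dict.insert, PySem.Str.startswith, PySem.Chars.startswith, hm]
  by_cases h5 : pc = "PC9"
  · subst h5; by_cases hm : "R3" ∈ acc <;>
      simp [pvLoop1, pvLoop2, pvRouterToDevices, pvSwitchToRouter, PySem.Dict.getD,
      PySem.Dict.get?, PySem.Dict.ofList, PySem.Dict.update, PySem.Dict.empty,
      PySem.Dict.insert, PySem.Str.startswith, PySem.Chars.startswith, hm]
  by_cases h6 : pc = "PC8"
  · subst h6; by_cases hm : "R3" ∈ acc <;>
      simp [pvLoop1, pvLoop2, pvRouterToDevices, pvSwitchToRouter, PySem.Dict.getD,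
      PySem.Dict.get?, PySem.Dict.ofList, PySem.Dict.update, PySem.Dict.empty,
      PySem.Dict.insert, PySem.Str.startswith, PySem.Chars.startswith, hm]
  by_cases h7 : pc = "PC7"
  · subst h7; by_cases hm : "R3" ∈ acc <;>
      simp [pvLoop1, pvLoop2, pvRouterToDevices, pvSwitchToRouter, PySem.Dict.getD,
      PySem.Dict.get?, PySem.Dict.ofList, PySem.Dict.update, PySem.Dict.empty,
      PySem.Dict.insert, PySem.Str.startswith, PySem.Chars.startswith, hm]
  by_cases h8 : pc = "PC1"
  · subst h8; by_cases hm : "R4" ∈ acc <;>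
      simp [pvLoop1, pvLoop2, pvRouterToDevices, pvSwitchToRouter, PySem.Dict.getD,
      PySem.Dict.get?, PySem.Dict.ofList, PySem.Dict.update, PySem.Dict.empty,
      PySem.Dict.insert, PySem.Str.startswith, PySem.Chars.startswith, hm]
  by_cases h9 : pc = "PC2"
  · subst h9; by_cases hm : "R4" ∈ acc <;>
      simp [pvLoop1, pvLoop2, pvRouterToDevices, pvSwitchToRouter, PySem.Dict.getD,
      PySem.Dict.get?, PySem.Dict.ofList, PySem.Dict.update, PySem.Dict.empty,
      PySem.Dict.insert, PySem.Str.startswith, PySem.Chars.startswith, hm]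
  by_cases h10 : pc = "PC3"
  · subst h10; by_cases hm : "R4" ∈ acc <;>
      simp [pvLoop1, pvLoop2, pvRouterToDevices, pvSwitchToRouter, PySem.Dict.getD,
      PySem.Dict.get?, PySem.Dict.ofList, PySem.Dict.update, PySem.Dict.empty,
      PySem.Dict.insert, PySem.Str.startswith, PySem.Chars.startswith, hm]
  by_cases h11 : pc = "PC4"
  · subst h11; by_cases hm : "R5" ∈ acc <;>
      simp [pvLoop1, pvLoop2, pvRouterToDevices, pvSwitchToRouter, PySem.Dict.getD,
      PySem.Dict.get?, PySem.Dict.ofList, PySem.Dict.update, PySem.Dict.empty,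
      PySem.Dict.insert, PySem.Str.startswith, PySem.Chars.startswith, hm]
  by_cases h12 : pc = "PC5"
  · subst h12; by_cases hm : "R5" ∈ acc <;>
      simp [pvLoop1, pvLoop2, pvRouterToDevices, pvSwitchToRouter, PySem.Dict.getD,
      PySem.Dict.get?, PySem.Dict.ofList, PySem.Dict.update, PySem.Dict.empty,
      PySem.Dict.insert, PySem.Str.startswith, PySem.Chars.startswith, hm]
  by_cases h13 : pc = "PC6"
  · subst h13; by_cases hm : "R5" ∈ acc <;>
      simp [pvLoop1, pvLoop2, pvRouterToDevices, pvSwitchToRouter, PySem.Dict.getD,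
      PySem.Dict.get?, PySem.Dict.ofList, PySem.Dict.update, PySem.Dict.empty,
      PySem.Dict.insert, PySem.Str.startswith, PySem.Chars.startswith, hm]
  by_cases h14 : pc = "Ubuntu20.04VM-1"
  · subst h14; by_cases hm : "R1" ∈ acc <;>
      simp [pvLoop1, pvLoop2, pvRouterToDevices, pvSwitchToRouter, PySem.Dict.getD,
      PySem.Dict.get?, PySem.Dict.ofList, PySem.Dict.update, PySem.Dict.empty,
      PySem.Dict.insert, PySem.Str.startswith, PySem.Chars.startswith, hm]
  simp [pvLoop1, pvLoop2, pvRouterToDevices, pvSwitchToRouter, PySem.Dict.getD,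
      PySem.Dict.get?, PySem.Dict.ofList, PySem.Dict.update, PySem.Dict.empty,
      PySem.Dict.insert, PySem.Str.startswith, PySem.Chars.startswith, h1, Ne.symm h1, h2, Ne.symm h2, h3, Ne.symm h3, h4, Ne.symm h4, h5, Ne.symm h5, h6, Ne.symm h6, h7, Ne.symm h7, h8, Ne.symm h8, h9, Ne.symm h9, h10, Ne.symm h10, h11, Ne.symm h11, h12, Ne.symm h12, h13, Ne.symm h13, h14, Ne.symm h14]
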